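-- pv_equiv track=rewrite | github.com/grigorusha/GeraniumsPot | Source/part.py | check_latch
-- ===== SOURCE A (Python) =====
-- def check_latch(part_mas, direction=0):
--     if direction==0: # проверяем есть ли в круге противоположный набор защелок
--         fl_dir = 0
--         for part in part_mas:
--             if part["latch"]==0: continue
--             if fl_dir == 0:
--                 fl_dir = part["latch"]
--             elif fl_dir != part["latch"]:
--                 return False
--     else: # проверяем есть ли обратные защелки от заданного направления
--         for part in part_mas:
--             if part["latch"]==0: continue
--             if part["latch"]!=direction:
--                 return False
--     return True
-- ===== SOURCE B (Python) =====
-- def check_latch(part_mas, direction=0):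
--     latches = {p["latch"] for p in part_mas if p["latch"] != 0}
--     if direction == 0:
--         return len(latches) <= 1
--     return all(x == direction for x in latches)
-- ===== Notes on version B (the rewrite author's own statement) =====
-- stated objective: simpler
-- what changed: Replaces the two flag-tracking early-exit loops with one collect-then-check: build the set of distinct nonzero latch values, then test its size (direction==0) or that it only contains direction. Pre_ excludes inputs where some part dict lacks the "latch" key, on which both A and B raise KeyError (A possibly after an early return, B always).
-- outside the precondition, e.g. on check_latch([{'latch': 1}, {'latch': 2}, {}], 0): A returns False, B raises KeyError
import Mathlib
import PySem

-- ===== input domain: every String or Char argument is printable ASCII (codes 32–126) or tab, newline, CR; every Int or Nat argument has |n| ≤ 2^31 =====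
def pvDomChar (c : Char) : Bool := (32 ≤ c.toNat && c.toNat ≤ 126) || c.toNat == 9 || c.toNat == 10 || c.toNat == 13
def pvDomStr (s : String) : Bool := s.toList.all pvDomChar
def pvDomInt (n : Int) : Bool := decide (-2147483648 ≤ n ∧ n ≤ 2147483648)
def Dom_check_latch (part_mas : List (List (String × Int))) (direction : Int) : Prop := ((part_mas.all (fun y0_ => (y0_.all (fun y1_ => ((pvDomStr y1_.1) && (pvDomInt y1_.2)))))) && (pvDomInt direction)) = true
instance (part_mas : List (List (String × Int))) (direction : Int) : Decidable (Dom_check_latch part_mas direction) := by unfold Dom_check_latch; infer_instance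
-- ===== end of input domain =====

-- B replaces A's flag-tracking early-exit loops by collecting the set of distinct nonzero
-- latch values and checking a property of that set (simpler decomposition, same cost).

-- part["latch"] (total form; Pre_ guarantees the key exists, so getD is never taken)
def latchOf (p : List (String × Int)) : Int := ((PySem.Dict.mk p).get? "latch").getD 0

-- ===== PORT A =====
-- A's direction==0 loop: fl_dir accumulator, early return False on a second distinct nonzero latch
def chkLoop0 : List (List (String × Int)) → Int → Bool
  | [], _ => true
  | p :: rest, fl =>
    if latchOf p = 0 then chkLoop0 rest fl
    else if fl = 0 then chkLoop0 rest (latchOf p)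
    else if fl ≠ latchOf p then false
    else chkLoop0 rest fl

-- A's direction!=0 loop: early return False on a nonzero latch different from direction
def chkLoopD : List (List (String × Int)) → Int → Bool
  | [], _ => true
  | p :: rest, d =>
    if latchOf p = 0 then chkLoopD rest d
    else if latchOf p ≠ d then false
    else chkLoopD rest d

def check_latch (part_mas : List (List (String × Int))) (direction : Int) : Bool :=
  if direction = 0 then chkLoop0 part_mas 0 else chkLoopD part_mas direction

-- ===== PORT B =====
-- the values of the comprehension {p["latch"] for p in part_mas if p["latch"] != 0}, before dedup
def latchList (part_mas : List (List (String × Int))) : List Int :=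
  part_mas.filterMap (fun p => if latchOf p ≠ 0 then some (latchOf p) else none)

def check_latch_alt (part_mas : List (List (String × Int))) (direction : Int) : Bool :=
  if direction = 0 then decide (PySem.Set.len (PySem.Set.ofList (latchList part_mas)) ≤ 1)
  else (PySem.Set.ofList (latchList part_mas)).all (fun x => x == direction)

-- ===== PRECONDITION & SPEC =====
-- Pre_ excludes inputs where some part dict lacks the "latch" key: there Python A raises
-- KeyError (except when an earlier part already forced `return False`) and Python B always raises.
def Pre_check_latch (part_mas : List (List (String × Int))) (direction : Int) : Prop :=
  ∀ p ∈ part_mas, ((PySem.Dict.mk p).get? "latch").isSome = true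
instance (part_mas : List (List (String × Int))) (direction : Int) : Decidable (Pre_check_latch part_mas direction) := by unfold Pre_check_latch; infer_instance
def pvWitness_check_latch : (List (List (String × Int))) × Int := ([[("latch", 1)], [("latch", 1), ("id", 3)]], 0)

def Spec_check_latch (part_mas : List (List (String × Int))) (direction : Int) (out : Bool) : Prop := out = check_latch_alt part_mas direction
instance (part_mas : List (List (String × Int))) (direction : Int) (out : Bool) : Decidable (Spec_check_latch part_mas direction out) := by unfold Spec_check_latch; infer_instance

-- ===== CLAIM (what is proved, stated in full; the proofs are below) =====
def Claim_equal_check_latch : Prop := ∀ (part_mas : List (List (String × Int))) (direction : Int), Dom_check_latch part_mas direction → Pre_check_latch part_mas direction → Spec_check_latch part_mas direction (check_latch part_mas direction)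

-- ===== LEMMAS AND PROOFS =====

theorem latchList_cons (p : List (String × Int)) (rest : List (List (String × Int))) :
    latchList (p :: rest) =
      if latchOf p = 0 then latchList rest else latchOf p :: latchList rest := by
  by_cases h : latchOf p = 0 <;> simp [latchList, h]

theorem all_ofList (xs : List Int) (p : Int → Bool) :
    (PySem.Set.ofList xs).all p = xs.all p := by
  rw [Bool.eq_iff_iff, List.all_eq_true, List.all_eq_true]
  exact ⟨fun h x hx => h x ((PySem.Set.mem_ofList xs x).mpr hx),
         fun h x hx => h x ((PySem.Set.mem_ofList xs x).mp hx)⟩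

theorem chkLoopD_eq (pm : List (List (String × Int))) (d : Int) :
    chkLoopD pm d = (latchList pm).all (fun x => x == d) := by
  induction pm with
  | nil => rfl
  | cons p rest ih =>
    rw [latchList_cons, chkLoopD]
    by_cases h0 : latchOf p = 0
    · simp only [if_pos h0, ih]
    · by_cases hd : latchOf p = d
      · have hdn : d ≠ 0 := hd ▸ h0
        simp [hd, hdn, ih]
      · simp [h0, hd]

theorem chkLoop0_ne (pm : List (List (String × Int))) (fl : Int) (hfl : fl ≠ 0) :
    chkLoop0 pm fl = true ↔ ∀ x ∈ latchList pm, x = fl := by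
  induction pm with
  | nil => simp [chkLoop0, latchList]
  | cons p rest ih =>
    rw [latchList_cons, chkLoop0]
    by_cases h0 : latchOf p = 0
    · simpa [h0] using ih
    · by_cases he : fl = latchOf p
      · simp [hfl, ← he, ih]
      · simp [h0, hfl, he, Ne.symm he]

theorem chkLoop0_zero (pm : List (List (String × Int))) :
    chkLoop0 pm 0 = true ↔ ∀ x ∈ latchList pm, ∀ y ∈ latchList pm, x = y := by
  induction pm with
  | nil => simp [chkLoop0, latchList]
  | cons p rest ih =>
    rw [latchList_cons, chkLoop0]
    by_cases h0 : latchOf p = 0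
    · simpa [h0] using ih
    · rw [if_neg h0, if_pos rfl, chkLoop0_ne rest _ h0, if_neg h0]
      simp only [List.mem_cons]
      constructor
      · intro h x hx y hy
        rcases hx with hx | hx <;> rcases hy with hy | hy
        · rw [hx, hy]
        · rw [hx]; exact (h y hy).symm
        · rw [hy]; exact h x hx
        · rw [h x hx, h y hy]
      · intro h x hx
        exact h x (Or.inr hx) _ (Or.inl rfl)

theorem len_le_one_iff (xs : List Int) :
    decide (PySem.Set.len (PySem.Set.ofList xs) ≤ 1) = true ↔
      ∀ x ∈ xs, ∀ y ∈ xs, x = y := by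
  have hnd : (PySem.Set.ofList xs).Nodup := PySem.Set.nodup_ofList xs
  have hmem : ∀ x, x ∈ PySem.Set.ofList xs ↔ x ∈ xs := fun x => PySem.Set.mem_ofList xs x
  have hlen : PySem.Set.len (PySem.Set.ofList xs) = ((PySem.Set.ofList xs).length : Int) := rfl
  rw [decide_eq_true_iff, hlen]
  constructor
  · intro h x hx y hy
    rcases hs : PySem.Set.ofList xs with _ | ⟨a, _ | ⟨b, t⟩⟩
    · exact absurd ((hmem x).mpr hx) (by rw [hs]; simp)
    · have hxa : x = a := by have := (hmem x).mpr hx; rw [hs] at this; simpa using this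
      have hya : y = a := by have := (hmem y).mpr hy; rw [hs] at this; simpa using this
      rw [hxa, hya]
    · rw [hs] at h; simp at h; omega
  · intro h
    rcases hs : PySem.Set.ofList xs with _ | ⟨a, _ | ⟨b, t⟩⟩
    · simp
    · simp
    · exfalso
      rw [hs] at hnd
      have ha : a ∈ xs := (hmem a).mp (by rw [hs]; simp)
      have hb : b ∈ xs := (hmem b).mp (by rw [hs]; simp)
      have : a = b := h a ha b hb
      simp [this] at hnd

-- ===== VERDICT (by name: the statement is the Claim_ definition above) =====
theorem check_latch_spec : Claim_equal_check_latch := by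
  intro pm d _ _
  unfold Spec_check_latch check_latch check_latch_alt
  by_cases hd : d = 0
  · rw [if_pos hd, if_pos hd, Bool.eq_iff_iff, chkLoop0_zero, Iff.comm, len_le_one_iff]
  · rw [if_neg hd, if_neg hd, all_ofList, chkLoopD_eq]
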